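-- pv_equiv track=rewrite | github.com/MarcoPorcellato/logseq-matryca-parser | legacy/local_digestor.py | parse_trees
-- ===== SOURCE A (Python) =====
-- def parse_trees(text: str) -> list[str]:
--     trees: list[str] = []
--     current_tree: list[str] = []
--     for line in text.splitlines():
--         if line.startswith("- ") or line.startswith("# "):
--             if current_tree:
--                 trees.append("\n".join(current_tree))
--             current_tree = [line]
--         else:
--             if current_tree:
--                 current_tree.append(line)
--             elif line.strip():
--                 current_tree.append(line)
--     if current_tree:
--         trees.append("\n".join(current_tree))
--     return trees
-- ===== SOURCE B (Python) =====
-- def parse_trees(text: str) -> list[str]: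
--     def is_marker(line: str) -> bool:
--         return line.startswith("- ") or line.startswith("# ")
--
--     lines = text.splitlines()
--     # skip leading lines that start no tree (non-marker, blank when stripped)
--     i = 0
--     while i < len(lines) and not is_marker(lines[i]) and not lines[i].strip():
--         i += 1
--     lines = lines[i:]
--     trees = []
--     while lines:
--         # the tree is the head line plus the run of following non-marker lines
--         j = 1
--         while j < len(lines) and not is_marker(lines[j]):
--             j += 1
--         trees.append("\n".join(lines[:j]))
--         lines = lines[j:]
--     return trees
-- ===== Notes on version B (the rewrite author's own statement) =====
-- stated objective: simpler
-- what changed: B replaces A's per-line accumulator with two explicit phases: drop the leading blank non-marker lines, then repeatedly take each marker-or-content head together with the following run of non-marker lines as one tree and slice past it (boundaries-by-runs instead of a running current_tree list).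
import Mathlib
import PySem

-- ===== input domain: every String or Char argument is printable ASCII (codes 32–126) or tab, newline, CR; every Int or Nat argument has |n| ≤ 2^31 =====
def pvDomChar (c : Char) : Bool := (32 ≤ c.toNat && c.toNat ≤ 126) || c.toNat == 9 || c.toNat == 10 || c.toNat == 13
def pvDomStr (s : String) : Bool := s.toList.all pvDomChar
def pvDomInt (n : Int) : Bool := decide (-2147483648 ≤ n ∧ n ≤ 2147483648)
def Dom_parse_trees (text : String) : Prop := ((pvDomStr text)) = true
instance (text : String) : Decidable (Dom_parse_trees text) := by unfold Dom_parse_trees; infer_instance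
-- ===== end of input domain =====

-- B replaces A's line-by-line accumulator with a skip-leading-blanks pass followed by
-- repeated grouping of each head with the following run of non-marker lines (simpler decomposition, same cost).

-- the marker test shared by both programs: line.startswith("- ") or line.startswith("# ")
def pvMarker (line : String) : Bool :=
  PySem.Str.startswith line "- " || PySem.Str.startswith line "# "

-- ===== PORT A =====
-- one iteration of A's for-loop over (trees, current_tree)
def parseStep (st : List String × List String) (line : String) : List String × List String :=
  if pvMarker line then
    ((if st.2.isEmpty then st.1 else st.1 ++ [PySem.Str.join "\n" st.2]), [line])
  else if st.2.isEmpty = false then (st.1, st.2 ++ [line])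
  else if PySem.Str.strip line ≠ "" then (st.1, st.2 ++ [line])
  else st

def parse_trees (text : String) : List String :=
  let st := (PySem.Str.splitlines text).foldl parseStep ([], [])
  if st.2.isEmpty then st.1 else st.1 ++ [PySem.Str.join "\n" st.2]

-- ===== PORT B =====
-- a line skipped by B's first while-loop: not a marker and blank when stripped
def pvSkip (line : String) : Bool := !pvMarker line && (PySem.Str.strip line == "")

-- B's second while-loop: each group is the head line plus the following run of
-- non-marker lines (Source B finds the run with an index scan j; takeWhile/dropWhile is
-- exactly that prefix/suffix split)
def parseGroups : List String → List String
  | [] => []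
  | l :: ls =>
    PySem.Str.join "\n" (l :: ls.takeWhile (fun x => !pvMarker x))
      :: parseGroups (ls.dropWhile (fun x => !pvMarker x))
termination_by ls => ls.length
decreasing_by
  have := List.length_dropWhile_le (fun x => !pvMarker x) ls
  simp only [List.length_cons]; omega

def parse_trees_alt (text : String) : List String :=
  parseGroups ((PySem.Str.splitlines text).dropWhile pvSkip)

-- ===== PRECONDITION & SPEC =====
def Spec_parse_trees (text : String) (out : List String) : Prop := out = parse_trees_alt text
instance (text : String) (out : List String) : Decidable (Spec_parse_trees text out) := by unfold Spec_parse_trees; infer_instance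

-- ===== CLAIM (what is proved, stated in full; the proofs are below) =====
def Claim_equal_parse_trees : Prop := ∀ (text : String), Dom_parse_trees text → Spec_parse_trees text (parse_trees text)

-- ===== LEMMAS AND PROOFS =====

-- A's final "if current_tree: trees.append(...)"
def pvFinalize (st : List String × List String) : List String :=
  if st.2.isEmpty then st.1 else st.1 ++ [PySem.Str.join "\n" st.2]

-- abstract form of A's loop once a current tree has started
def gbspec (cur : List String) : List String → List String
  | [] => [PySem.Str.join "\n" cur]
  | l :: ls => if pvMarker l then PySem.Str.join "\n" cur :: gbspec [l] ls
               else gbspec (cur ++ [l]) ls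

theorem foldl_skip (ls : List String) (trees : List String) :
    ls.foldl parseStep (trees, []) = (ls.dropWhile pvSkip).foldl parseStep (trees, []) := by
  induction ls with
  | nil => rfl
  | cons l ls ih =>
    by_cases h : pvSkip l
    · have hm : pvMarker l = false := by
        simp [pvSkip] at h; exact h.1
      have hs : PySem.Str.strip l = "" := by
        simp [pvSkip] at h; exact h.2
      simp [h, parseStep, hm, hs, ← ih]
    · simp [h]

theorem foldl_started (ls : List String) :
    ∀ trees cur, cur ≠ [] →
    pvFinalize (ls.foldl parseStep (trees, cur)) = trees ++ gbspec cur ls := by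
  induction ls with
  | nil =>
    intro trees cur h
    simp [pvFinalize, gbspec, h]
  | cons l ls ih =>
    intro trees cur h
    simp only [List.foldl_cons]
    by_cases hm : pvMarker l
    · have : parseStep (trees, cur) l = (trees ++ [PySem.Str.join "\n" cur], [l]) := by
        simp [parseStep, hm, h]
      rw [this, ih _ _ (by simp)]
      simp [gbspec, hm]
    · have : parseStep (trees, cur) l = (trees, cur ++ [l]) := by
        simp [parseStep, hm, h]
      rw [this, ih _ _ (by simp)]
      simp [gbspec, hm]

theorem gbspec_eq_groups (ls : List String) :
    ∀ cur, gbspec cur ls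
      = PySem.Str.join "\n" (cur ++ ls.takeWhile (fun x => !pvMarker x))
        :: parseGroups (ls.dropWhile (fun x => !pvMarker x)) := by
  induction ls with
  | nil => intro cur; simp [gbspec, parseGroups]
  | cons l ls ih =>
    intro cur
    by_cases hm : pvMarker l
    · simp [gbspec, hm, ih, parseGroups]
    · simp [gbspec, hm, ih]

theorem pv_dropWhile_head_false {α : Type} (p : α → Bool) (xs : List α) (y : α)
    (ys : List α) (h : xs.dropWhile p = y :: ys) : p y = false := by
  induction xs with
  | nil => simp at h
  | cons x xs ih =>
    by_cases hp : p x
    · rw [List.dropWhile_cons_of_pos hp] at h; exact ih h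
    · rw [List.dropWhile_cons_of_neg (by simp [hp])] at h
      cases h; simpa using hp

-- ===== VERDICT (by name: the statement is the Claim_ definition above) =====
theorem parse_trees_spec : Claim_equal_parse_trees := by
  intro text _
  unfold Spec_parse_trees parse_trees parse_trees_alt
  rw [show ((PySem.Str.splitlines text).foldl parseStep ([], []))
        = (((PySem.Str.splitlines text).dropWhile pvSkip).foldl parseStep ([], []))
      from foldl_skip _ _]
  cases hds : (PySem.Str.splitlines text).dropWhile pvSkip with
  | nil => simp [parseGroups]
  | cons l rest =>
    have hskip : pvSkip l = false := pv_dropWhile_head_false pvSkip _ l rest hds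
    have hfirst : parseStep ([], []) l = ([], [l]) := by
      by_cases hm : pvMarker l
      · simp [parseStep, hm]
      · have hs : PySem.Str.strip l ≠ "" := by
          simp [pvSkip, hm] at hskip; exact hskip
        simp [parseStep, hm, hs]
    show pvFinalize _ = _
    rw [List.foldl_cons, hfirst, foldl_started _ _ _ (by simp),
        gbspec_eq_groups]
    simp [parseGroups]
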